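-- pv_equiv track=rewrite | github.com/bigdatatoai/ai_story | backend/core/services/professional_export_service.py | _split_story_into_chapters
-- ===== SOURCE A (Python) =====
-- from typing import Dict, List, Any, Optional
--
-- def _split_story_into_chapters(content: str) -> List[str]:
--     """将故事分章节"""
--     # 简单实现：按段落分章
--     paragraphs = [p.strip() for p in content.split('\n\n') if p.strip()]
--
--     # 每3-4个段落一章
--     chapters = []
--     current_chapter = []
--
--     for para in paragraphs:
--         current_chapter.append(para)
--         if len(current_chapter) >= 3:
--             chapters.append('\n\n'.join(current_chapter))
--             current_chapter = []
--
--     if current_chapter: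
--         chapters.append('\n\n'.join(current_chapter))
--
--     return chapters
-- ===== SOURCE B (Python) =====
-- def _split_story_into_chapters(content: str):
--     """Split into chapters of 3 paragraphs via stride-3 slicing (no accumulator/flush)."""
--     paragraphs = [p.strip() for p in content.split('\n\n') if p.strip()]
--     return ['\n\n'.join(paragraphs[i:i + 3]) for i in range(0, len(paragraphs), 3)]
-- ===== Notes on version B (the rewrite author's own statement) =====
-- stated objective: simpler
-- what changed: Replaces the accumulator loop with its size-3 flush and separate trailing flush by a single stride-3 slicing comprehension over paragraph start indices.
import Mathlib
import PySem

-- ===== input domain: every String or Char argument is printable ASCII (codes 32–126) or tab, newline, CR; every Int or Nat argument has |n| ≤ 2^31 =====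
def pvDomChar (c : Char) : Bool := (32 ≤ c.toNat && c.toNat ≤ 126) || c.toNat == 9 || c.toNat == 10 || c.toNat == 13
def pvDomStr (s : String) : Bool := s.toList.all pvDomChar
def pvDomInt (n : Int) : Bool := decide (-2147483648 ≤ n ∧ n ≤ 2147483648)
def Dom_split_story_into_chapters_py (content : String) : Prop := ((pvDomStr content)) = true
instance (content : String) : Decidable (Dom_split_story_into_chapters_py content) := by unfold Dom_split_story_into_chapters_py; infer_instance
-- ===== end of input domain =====

-- B replaces A's accumulator loop (flush at size 3 plus trailing flush) by a stride-3 slicing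
-- comprehension over start indices; same return value, objective: simpler.

-- ===== PORT A =====
-- the '\n\n' separator is a nonempty literal, so split? never returns none; getD [] is exact here
def split_story_into_chapters_py (content : String) : List String :=
  let paragraphs := (((PySem.Str.split? content "\n\n").getD []).map PySem.Str.strip).filter (fun p => p ≠ "")
  let st := paragraphs.foldl
    (fun (st : List String × List String) para =>
      let current := st.2 ++ [para]
      if current.length ≥ 3 then (st.1 ++ [PySem.Str.join "\n\n" current], [])
      else (st.1, current)) ([], [])
  if st.2 ≠ [] then st.1 ++ [PySem.Str.join "\n\n" st.2] else st.1

-- ===== PORT B =====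
def split_story_into_chapters_py_alt (content : String) : List String :=
  let paragraphs := (((PySem.Str.split? content "\n\n").getD []).map PySem.Str.strip).filter (fun p => p ≠ "")
  (PySem.List.pyRange 0 (paragraphs.length : Int) 3).map
    (fun i => PySem.Str.join "\n\n" (PySem.List.slice paragraphs (some i) (some (i + 3))))

-- ===== PRECONDITION & SPEC =====
def Spec_split_story_into_chapters_py (content : String) (out : List String) : Prop := out = split_story_into_chapters_py_alt content
instance (content : String) (out : List String) : Decidable (Spec_split_story_into_chapters_py content out) := by unfold Spec_split_story_into_chapters_py; infer_instance

-- ===== CLAIM (what is proved, stated in full; the proofs are below) =====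
def Claim_equal_split_story_into_chapters_py : Prop := ∀ (content : String), Dom_split_story_into_chapters_py content → Spec_split_story_into_chapters_py content (split_story_into_chapters_py content)

-- ===== LEMMAS AND PROOFS =====

-- the common reference shape: groups of three paragraphs, joined
def chunks3 (ps : List String) : List String :=
  if ps = [] then []
  else PySem.Str.join "\n\n" (ps.take 3) :: chunks3 (ps.drop 3)
termination_by ps.length
decreasing_by
  rename_i h
  have : ps.length ≠ 0 := fun h0 => h (List.eq_nil_of_length_eq_zero h0)
  simp [List.length_drop]; omega

lemma pyRange3_nonpos {n : Int} (h : n ≤ 0) : PySem.List.pyRange 0 n 3 = [] := by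
  rw [PySem.List.pyRange_of_pos 0 n (by norm_num)]
  simp [show ¬ (0 < n) from by omega]

lemma pyRange3_step {n : Int} (h : 0 < n) :
    PySem.List.pyRange 0 n 3 = 0 :: (PySem.List.pyRange 0 (n - 3) 3).map (fun i => i + 3) := by
  rw [PySem.List.pyRange_of_pos 0 n (by norm_num),
      PySem.List.pyRange_of_pos 0 (n - 3) (by norm_num)]
  have hm : (if 0 < n then ((n - 0 + 3 - 1) / 3).toNat else 0)
      = (if 0 < n - 3 then ((n - 3 - 0 + 3 - 1) / 3).toNat else 0) + 1 := by
    split_ifs <;> omega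
  rw [hm, List.range_succ_eq_map]
  simp only [List.map_cons, List.map_map]
  refine List.cons_eq_cons.mpr ⟨by norm_num, ?_⟩
  · apply List.map_congr_left
    intro k _
    simp only [Function.comp]
    push_cast
    ring

lemma slice_shift (xs : List String) (i : Int) (hi : 0 ≤ i) :
    PySem.List.slice xs (some (i + 3)) (some (i + 3 + 3))
      = PySem.List.slice (xs.drop 3) (some i) (some (i + 3)) := by
  rw [PySem.List.slice_toNat xs (by omega) (by omega),
      PySem.List.slice_toNat (xs.drop 3) (by omega) (by omega)]
  rw [List.drop_drop]
  have h1 : (i + 3).toNat = i.toNat + 3 := by omega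
  rw [h1]
  have h2 : (i + 3 + 3).toNat - (i.toNat + 3) = 3 := by omega
  have h3 : i.toNat + 3 - i.toNat = 3 := by omega
  rw [h2, h3, Nat.add_comm]

lemma Bcore_eq (ps : List String) :
    (PySem.List.pyRange 0 (ps.length : Int) 3).map
      (fun i => PySem.Str.join "\n\n" (PySem.List.slice ps (some i) (some (i + 3))))
    = chunks3 ps := by
  by_cases hps : ps = []
  · subst hps
    rw [chunks3]
    simp [pyRange3_nonpos (by norm_num : (0:Int) ≤ 0)]
  · rw [chunks3, if_neg hps]
    have hlen : 0 < (ps.length : Int) := by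
      have : ps.length ≠ 0 := fun h0 => hps (List.eq_nil_of_length_eq_zero h0)
      omega
    rw [pyRange3_step hlen]
    simp only [List.map_cons, List.map_map]
    congr 1
    · rw [show ((0:Int) + 3) = ((3:Nat) : Int) by norm_num, PySem.List.slice_zero_start,
          PySem.List.slice_to_natCast]
    · have hcongr : ∀ i ∈ PySem.List.pyRange 0 ((ps.length : Int) - 3) 3,
          PySem.Str.join "\n\n" (PySem.List.slice ps (some (i + 3)) (some (i + 3 + 3)))
            = PySem.Str.join "\n\n" (PySem.List.slice (ps.drop 3) (some i) (some (i + 3))) := by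
        intro i hi
        have h0i : 0 ≤ i := by
          rw [PySem.List.pyRange_of_pos 0 _ (by norm_num)] at hi
          simp at hi
          obtain ⟨k, _, hk⟩ := hi
          omega
        rw [slice_shift ps i h0i]
      have hrange : PySem.List.pyRange 0 ((ps.length : Int) - 3) 3
          = PySem.List.pyRange 0 (((ps.drop 3).length : Int)) 3 := by
        rcases Nat.lt_or_ge ps.length 3 with h3 | h3
        · rw [pyRange3_nonpos (by omega), pyRange3_nonpos (by simp [List.length_drop]; omega)]
        · congr 1
          simp [List.length_drop]
          omega
      calc (PySem.List.pyRange 0 ((ps.length : Int) - 3) 3).map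
              (fun i => PySem.Str.join "\n\n" (PySem.List.slice ps (some (i + 3)) (some (i + 3 + 3))))
          = (PySem.List.pyRange 0 ((ps.length : Int) - 3) 3).map
              (fun i => PySem.Str.join "\n\n" (PySem.List.slice (ps.drop 3) (some i) (some (i + 3)))) :=
            List.map_congr_left hcongr
        _ = (PySem.List.pyRange 0 (((ps.drop 3).length : Int)) 3).map
              (fun i => PySem.Str.join "\n\n" (PySem.List.slice (ps.drop 3) (some i) (some (i + 3)))) := by
            rw [hrange]
        _ = chunks3 (ps.drop 3) := Bcore_eq (ps.drop 3)
termination_by ps.length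
decreasing_by
  have : ps.length ≠ 0 := fun h0 => hps (List.eq_nil_of_length_eq_zero h0)
  simp [List.length_drop]; omega

-- A's loop with any partial chapter (shorter than 3) and already-emitted chapters
lemma loopA_eq (ps : List String) : ∀ (ch cur : List String), cur.length < 3 →
    (let st := ps.foldl
        (fun (st : List String × List String) para =>
          let current := st.2 ++ [para]
          if current.length ≥ 3 then (st.1 ++ [PySem.Str.join "\n\n" current], [])
          else (st.1, current)) (ch, cur)
     if st.2 ≠ [] then st.1 ++ [PySem.Str.join "\n\n" st.2] else st.1)
    = ch ++ chunks3 (cur ++ ps) := by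
  induction ps with
  | nil =>
    intro ch cur hcur
    simp only [List.foldl_nil, List.append_nil]
    by_cases hc : cur = []
    · subst hc; rw [chunks3]; simp
    · rw [chunks3, if_neg hc, List.take_of_length_le (by omega),
          List.drop_eq_nil_of_le (by omega), chunks3]
      simp [hc]
  | cons p ps ih =>
    intro ch cur hcur
    simp only [List.foldl_cons]
    by_cases h3 : (cur ++ [p]).length ≥ 3
    · have hcl : (cur ++ [p]).length = 3 := by
        simp only [List.length_append, List.length_cons, List.length_nil] at h3 ⊢; omega
      simp only [if_pos h3]
      rw [ih (ch ++ [PySem.Str.join "\n\n" (cur ++ [p])]) [] (by norm_num)]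
      simp only [List.nil_append]
      have hsplit : cur ++ p :: ps = (cur ++ [p]) ++ ps := by simp
      have hR : chunks3 ((cur ++ [p]) ++ ps)
          = PySem.Str.join "\n\n" (cur ++ [p]) :: chunks3 ps := by
        rw [chunks3, if_neg (by simp), List.take_left' hcl, List.drop_left' hcl]
      rw [hsplit, hR]
      simp
    · simp only [if_neg h3]
      rw [ih ch (cur ++ [p]) (by omega)]
      rw [List.append_assoc]
      simp

-- ===== VERDICT (by name: the statement is the Claim_ definition above) =====
theorem split_story_into_chapters_py_spec : Claim_equal_split_story_into_chapters_py := by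
  intro content _
  unfold Spec_split_story_into_chapters_py split_story_into_chapters_py split_story_into_chapters_py_alt
  rw [Bcore_eq]
  exact loopA_eq _ [] [] (by norm_num)
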